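-- pv_equiv track=rewrite | github.com/RedBearAK/PDF-Manipulator | pdf_manipulator/core/page_range/patterns copy.py | looks_like_pattern
-- ===== SOURCE A (Python) =====
-- def looks_like_pattern(range_str: str) -> bool:
--     """
--     Check if string looks like a pattern expression.
--
--     FIXED: No comma detection - that happens at parser level now.
--     """
--     range_str = range_str.strip()
--
--     # Must contain a colon to be a pattern
--     if ':' not in range_str:
--         return False
--
--     # Check for valid pattern prefixes
--     pattern_prefixes = ['contains', 'regex', 'line-starts', 'type', 'size']
--
--     for prefix in pattern_prefixes:
--         # Handle case-insensitive patterns: "contains/i:"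
--         if range_str.lower().startswith(prefix + '/i:'):
--             value_part = range_str[len(prefix) + 3:]  # Skip "prefix/i:"
--             return _is_valid_pattern_value(value_part)
--         # Handle regular patterns: "contains:"
--         elif range_str.lower().startswith(prefix + ':'):
--             value_part = range_str[len(prefix) + 1:]  # Skip "prefix:"
--             return _is_valid_pattern_value(value_part)
--
--     return False
--
-- def _is_valid_pattern_value(value_part: str) -> bool:
--     """Check if the value part of a pattern is valid."""
--     # Empty value is invalid
--     if not value_part or not value_part.strip():
--         return False
--
--     value_part = value_part.strip()
--
--     # For quoted values, ensure there's content inside quotes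
--     if value_part.startswith('"') and value_part.endswith('"'):
--         return len(value_part) > 2
--     elif value_part.startswith("'") and value_part.endswith("'"):
--         return len(value_part) > 2
--
--     # For unquoted values, must be non-empty
--     return bool(value_part)
-- ===== SOURCE B (Python) =====
-- _PATTERN_PREFIXES = frozenset({'contains', 'regex', 'line-starts', 'type', 'size'})
--
--
-- def looks_like_pattern(range_str: str) -> bool:
--     """Check if string looks like a pattern expression."""
--     head, sep, value = range_str.strip().partition(':')
--     if not sep:
--         return False
--     prefix = head.lower()
--     if prefix.endswith('/i'):
--         prefix = prefix[:-2]
--     return prefix in _PATTERN_PREFIXES and _is_valid_pattern_value(value)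
--
--
-- def _is_valid_pattern_value(value_part: str) -> bool:
--     value = value_part.strip()
--     if value and value[0] == value[-1] and value[0] in '"\'':
--         return len(value) > 2
--     return bool(value)
-- ===== Notes on version B (the rewrite author's own statement) =====
-- stated objective: simpler
-- what changed: Replaces the 5-prefix loop of paired startswith checks (10 probes) with a single partition at the first colon, one optional strip of the case-insensitivity suffix, and one frozenset membership test; the value validator merges the two quote branches into one head-equals-tail check.
import Mathlib
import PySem

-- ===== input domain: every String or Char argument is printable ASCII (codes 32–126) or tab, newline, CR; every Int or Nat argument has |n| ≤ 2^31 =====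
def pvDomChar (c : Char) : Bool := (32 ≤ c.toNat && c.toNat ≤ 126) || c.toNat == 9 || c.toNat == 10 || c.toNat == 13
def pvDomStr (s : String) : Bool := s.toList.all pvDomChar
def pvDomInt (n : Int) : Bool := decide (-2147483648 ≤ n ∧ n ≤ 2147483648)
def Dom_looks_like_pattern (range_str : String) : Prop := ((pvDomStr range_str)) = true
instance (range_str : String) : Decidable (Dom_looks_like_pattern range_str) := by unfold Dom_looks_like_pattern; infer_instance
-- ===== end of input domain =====

-- ===== PORT A =====
-- B replaces A's 5-prefix loop of paired startswith probes by one split at the first colon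
-- plus a single set-membership test (objective: simpler; same cost).
-- Transliteration of A's `_is_valid_pattern_value`.
def pvAValid (value_part : List Char) : Bool :=
  if value_part == [] || PySem.Chars.strip value_part == [] then false
  else
    let v := PySem.Chars.strip value_part
    if PySem.Chars.startswith v ['"'] && PySem.Chars.endswith v ['"'] then decide (2 < v.length)
    else if PySem.Chars.startswith v ['\''] && PySem.Chars.endswith v ['\''] then decide (2 < v.length)
    else !(v == [])

-- A's `for prefix in pattern_prefixes` loop, one step per prefix.
def pvALoop (s : List Char) : List (List Char) → Bool
  | [] => false
  | p :: rest =>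
    if PySem.Chars.startswith (PySem.Chars.lower s) (p ++ ['/', 'i', ':']) then
      pvAValid (PySem.Chars.slice s (some ((p.length : Int) + 3)) none)
    else if PySem.Chars.startswith (PySem.Chars.lower s) (p ++ [':']) then
      pvAValid (PySem.Chars.slice s (some ((p.length : Int) + 1)) none)
    else pvALoop s rest

def looks_like_pattern (range_str : String) : Bool :=
  let s := PySem.Chars.strip range_str.toList
  if !(PySem.Chars.isIn [':'] s) then false
  else pvALoop s ["contains".toList, "regex".toList, "line-starts".toList, "type".toList, "size".toList]

-- ===== PORT B =====
-- `head, sep, value = s.partition(':')` — split at the FIRST colon (none ⇒ no colon).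
def pvSplitColon : List Char → Option (List Char × List Char)
  | [] => none
  | c :: t =>
    if c = ':' then some ([], t)
    else
      match pvSplitColon t with
      | none => none
      | some (h, v) => some (c :: h, v)

-- Transliteration of B's `_is_valid_pattern_value`.
def pvBValid (value_part : List Char) : Bool :=
  match PySem.Chars.strip value_part with
  | [] => false
  | c :: rest =>
    if (c == (c :: rest).getLast (by simp)) && (c == '"' || c == '\'') then
      decide (2 < (c :: rest).length)
    else true

def pvPrefixSet : PySem.Set (List Char) :=
  PySem.Set.ofList ["contains".toList, "regex".toList, "line-starts".toList, "type".toList, "size".toList]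

def looks_like_pattern_alt (range_str : String) : Bool :=
  match pvSplitColon (PySem.Chars.strip range_str.toList) with
  | none => false
  | some (h, v) =>
    let p0 := PySem.Chars.lower h
    let p := if PySem.Chars.endswith p0 ['/', 'i'] then PySem.Chars.slice p0 none (some (-2)) else p0
    PySem.Set.contains pvPrefixSet p && pvBValid v

-- ===== PRECONDITION & SPEC =====
def Spec_looks_like_pattern (range_str : String) (out : Bool) : Prop := out = looks_like_pattern_alt range_str
instance (range_str : String) (out : Bool) : Decidable (Spec_looks_like_pattern range_str out) := by unfold Spec_looks_like_pattern; infer_instance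

-- ===== CLAIM (what is proved, stated in full; the proofs are below) =====
def Claim_equal_looks_like_pattern : Prop := ∀ (range_str : String), Dom_looks_like_pattern range_str → Spec_looks_like_pattern range_str (looks_like_pattern range_str)

-- ===== LEMMAS AND PROOFS =====

theorem pv_lowerChar_colon {c : Char} (h : PySem.Chars.lowerChar c = ':') : c = ':' := by
  unfold PySem.Chars.lowerChar at h
  split at h
  · next hu =>
    unfold PySem.Chars.isupper at hu
    exfalso
    simp only [Bool.and_eq_true, decide_eq_true_eq, Char.le_def] at hu
    have h1 : 65 ≤ c.toNat ∧ c.toNat ≤ 90 := ⟨hu.1, hu.2⟩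
    have h2 : (Char.ofNat (c.toNat + 32)).toNat = (':' : Char).toNat := by rw [h]
    rw [Char.toNat_ofNat, if_pos (Or.inl (by omega))] at h2
    have h3 : (':' : Char).toNat = 58 := by decide
    omega
  · exact h

theorem pv_colon_not_mem_lower {h : List Char} (hh : ':' ∉ h) : ':' ∉ PySem.Chars.lower h := by
  intro hm
  have : PySem.Chars.lower h = h.map PySem.Chars.lowerChar := rfl
  rw [this, List.mem_map] at hm
  obtain ⟨c, hc, he⟩ := hm
  exact hh (pv_lowerChar_colon he ▸ hc)

theorem pv_splitColon_none {t : List Char} (h : pvSplitColon t = none) : ':' ∉ t := by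
  induction t with
  | nil => simp
  | cons c t ih =>
    simp only [pvSplitColon] at h
    split at h
    · exact absurd h (by simp)
    · next hc =>
      intro hm
      rcases List.mem_cons.mp hm with h1 | h2
      · exact hc h1.symm
      · cases hsp : pvSplitColon t with
        | none => exact ih hsp h2
        | some r => rw [hsp] at h; simp at h

theorem pv_splitColon_some {t h v : List Char} (hs : pvSplitColon t = some (h, v)) :
    t = h ++ ':' :: v ∧ ':' ∉ h := by
  induction t generalizing h v with
  | nil => simp [pvSplitColon] at hs
  | cons c t ih =>
    simp only [pvSplitColon] at hs
    split at hs
    · next hc =>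
      subst hc
      obtain ⟨h1, h2⟩ := Option.some.injEq _ _ ▸ hs
      cases hs
      simp
    · next hc =>
      cases hsp : pvSplitColon t with
      | none => rw [hsp] at hs; simp at hs
      | some r =>
        obtain ⟨h', v'⟩ := r
        rw [hsp] at hs
        simp only [Option.some.injEq, Prod.mk.injEq] at hs
        obtain ⟨rfl, rfl⟩ := hs
        obtain ⟨ht, hnm⟩ := ih hsp
        subst ht
        refine ⟨by simp, ?_⟩
        simp only [List.mem_cons, not_or]
        exact ⟨fun e => hc e.symm, hnm⟩

theorem pv_lower_eq_map (l : List Char) : PySem.Chars.lower l = l.map PySem.Chars.lowerChar := rfl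

theorem pv_lower_length (l : List Char) : (PySem.Chars.lower l).length = l.length := by
  rw [pv_lower_eq_map, List.length_map]

theorem pv_lower_split (h v : List Char) :
    PySem.Chars.lower (h ++ ':' :: v) = PySem.Chars.lower h ++ ':' :: PySem.Chars.lower v := by
  simp [pv_lower_eq_map, show PySem.Chars.lowerChar ':' = ':' from by decide]

theorem pv_prefix_colon_iff (q h' rest : List Char) (hq : ':' ∉ q) (hh : ':' ∉ h') :
    q ++ [':'] <+: h' ++ ':' :: rest ↔ q = h' := by
  induction q generalizing h' with
  | nil =>
    cases h' with
    | nil => simp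
    | cons c h'' =>
      simp only [List.nil_append, List.cons_append, List.cons_prefix_cons]
      constructor
      · rintro ⟨rfl, -⟩; exact absurd (List.mem_cons_self) hh
      · rintro h; simp at h
  | cons a q' ih =>
    cases h' with
    | nil =>
      simp only [List.cons_append, List.nil_append, List.cons_prefix_cons]
      constructor
      · rintro ⟨rfl, -⟩; exact absurd (List.mem_cons_self) hq
      · rintro h; simp at h
    | cons c h'' =>
      simp only [List.cons_append, List.cons_prefix_cons, List.cons.injEq]
      constructor
      · rintro ⟨rfl, hp⟩
        refine ⟨rfl, (ih h'' (fun m => hq (List.mem_cons_of_mem _ m)) (fun m => hh (List.mem_cons_of_mem _ m))).mp hp⟩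
      · rintro ⟨rfl, rfl⟩
        refine ⟨rfl, ?_⟩
        have he : (q' ++ [':']) ++ rest = q' ++ ':' :: rest := by simp
        exact he ▸ List.prefix_append (q' ++ [':']) rest

theorem pv_startswith_colon (h v q : List Char) (hnh : ':' ∉ h) (hq : ':' ∉ q) :
    PySem.Chars.startswith (PySem.Chars.lower (h ++ ':' :: v)) (q ++ [':']) =
      decide (PySem.Chars.lower h = q) := by
  rw [pv_lower_split]
  have hiff := pv_prefix_colon_iff q (PySem.Chars.lower h) (PySem.Chars.lower v) hq
    (pv_colon_not_mem_lower hnh)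
  rw [show PySem.Chars.startswith = fun s p => p.isPrefixOf s from rfl]
  by_cases he : PySem.Chars.lower h = q
  · rw [decide_eq_true he]
    exact List.isPrefixOf_iff_prefix.mpr (hiff.mpr he.symm)
  · rw [decide_eq_false he, Bool.eq_false_iff]
    intro hp
    exact he (hiff.mp (List.isPrefixOf_iff_prefix.mp hp)).symm

theorem pv_slice_drop (h v : List Char) (k : Int) (hk : k = (h.length : Int) + 1) :
    PySem.Chars.slice (h ++ ':' :: v) (some k) none = v := by
  subst hk
  rw [PySem.Chars.slice_eq_listSlice]
  rw [show ((h.length : Int) + 1) = ((h.length + 1 : Nat) : Int) from by push_cast; ring]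
  rw [PySem.List.slice_from_natCast]
  rw [show h ++ ':' :: v = (h ++ [':']) ++ v from by simp]
  rw [List.drop_left' (by simp)]

theorem pv_endswith_single (l : List Char) (hl : l ≠ []) (a : Char) :
    PySem.Chars.endswith l [a] = (l.getLast hl == a) := by
  by_cases hsuf : [a] <:+ l
  · obtain ⟨t, rfl⟩ := hsuf
    have h1 : PySem.Chars.endswith (t ++ [a]) [a] = true := by
      rw [PySem.Chars.endswith_iff]; exact ⟨t, rfl⟩
    rw [h1, List.getLast_append_singleton, beq_self_eq_true]
  · have h1 : PySem.Chars.endswith l [a] = false := by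
      rw [Bool.eq_false_iff]
      intro hp
      exact hsuf ((PySem.Chars.endswith_iff _ _).mp hp)
    rw [h1, eq_comm, Bool.eq_false_iff]
    intro hb
    apply hsuf
    have := List.dropLast_append_getLast hl
    refine ⟨l.dropLast, ?_⟩
    rw [show a = l.getLast hl from (eq_of_beq hb).symm]
    exact this

theorem pv_startswith_cons_single (c a : Char) (rest : List Char) :
    PySem.Chars.startswith (c :: rest) [a] = (a == c) := by
  rw [show PySem.Chars.startswith = fun s p => p.isPrefixOf s from rfl]
  show [a].isPrefixOf (c :: rest) = (a == c)
  simp [List.isPrefixOf]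

theorem pv_valid_eq (v : List Char) : pvAValid v = pvBValid v := by
  unfold pvAValid pvBValid
  cases hw : PySem.Chars.strip v with
  | nil => simp
  | cons c rest =>
    have hv : (v == []) = false := by
      cases v with
      | nil => exact absurd hw (by simp [show PySem.Chars.strip ([] : List Char) = [] from rfl])
      | cons a t => simp
    simp only [hv, Bool.false_or]
    rw [if_neg (by simp)]
    rw [pv_startswith_cons_single, pv_startswith_cons_single,
        pv_endswith_single (c :: rest) (by simp) '"',
        pv_endswith_single (c :: rest) (by simp) '\'']
    set L := (c :: rest).getLast (by simp) with hLdef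
    by_cases h1 : c = '"'
    · subst h1
      by_cases h2 : L = '"'
      · simp [h2]
      · simp [h2, show ('"' == '\'') = false from by decide]
        exact Or.inl fun e => h2 e.symm
    · by_cases h1' : c = '\''
      · subst h1'
        by_cases h2 : L = '\''
        · simp [h2, show ('\'' == '"') = false from by decide]
        · simp [show ('\'' == '"') = false from by decide, h2]
          exact Or.inl fun e => h2 e.symm
      · simp [show (c == '"') = false from beq_eq_false_iff_ne.mpr h1,
              show (c == '\'') = false from beq_eq_false_iff_ne.mpr h1']
        rw [if_neg (fun hx => h1 hx.1.symm)]
        exact Or.inl (Or.inl fun e => h1' e.symm)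

theorem pv_loop_eq (h v : List Char) (hnh : ':' ∉ h) :
    pvALoop (h ++ ':' :: v)
      ["contains".toList, "regex".toList, "line-starts".toList, "type".toList, "size".toList] =
    (PySem.Set.contains pvPrefixSet
        (if PySem.Chars.endswith (PySem.Chars.lower h) ['/', 'i']
         then PySem.Chars.slice (PySem.Chars.lower h) none (some (-2))
         else PySem.Chars.lower h) && pvBValid v) := by
  have hassoc : ∀ (p : List Char), p ++ ['/', 'i', ':'] = (p ++ ['/', 'i']) ++ [':'] :=
    fun p => by simp
  simp only [pvALoop, hassoc]
  rw [pv_startswith_colon h v ("contains".toList ++ ['/', 'i']) hnh (by decide)]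
  rw [pv_startswith_colon h v "contains".toList hnh (by decide)]
  rw [pv_startswith_colon h v ("regex".toList ++ ['/', 'i']) hnh (by decide)]
  rw [pv_startswith_colon h v "regex".toList hnh (by decide)]
  rw [pv_startswith_colon h v ("line-starts".toList ++ ['/', 'i']) hnh (by decide)]
  rw [pv_startswith_colon h v "line-starts".toList hnh (by decide)]
  rw [pv_startswith_colon h v ("type".toList ++ ['/', 'i']) hnh (by decide)]
  rw [pv_startswith_colon h v "type".toList hnh (by decide)]
  rw [pv_startswith_colon h v ("size".toList ++ ['/', 'i']) hnh (by decide)]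
  rw [pv_startswith_colon h v "size".toList hnh (by decide)]
  simp only [decide_eq_true_eq]
  by_cases hg1 : PySem.Chars.lower h = ("contains".toList ++ ['/', 'i'])
  · rw [if_pos hg1]
    have hlen : h.length = (("contains".toList ++ ['/', 'i']) : List Char).length := by rw [← pv_lower_length h, hg1]
    have hql : (("contains".toList ++ ['/', 'i']) : List Char).length = 10 := by decide
    rw [pv_slice_drop h v (("contains".toList.length : Int) + 3) (by rw [hlen, hql]; try decide)]
    rw [pv_valid_eq, hg1]
    rw [show PySem.Set.contains pvPrefixSet
          (if PySem.Chars.endswith ("contains".toList ++ ['/', 'i']) ['/', 'i']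
           then PySem.Chars.slice ("contains".toList ++ ['/', 'i']) none (some (-2)) else ("contains".toList ++ ['/', 'i'])) = true from by decide,
        Bool.true_and]
  · rw [if_neg hg1]
    by_cases hg2 : PySem.Chars.lower h = "contains".toList
    · rw [if_pos hg2]
      have hlen : h.length = ("contains".toList : List Char).length := by rw [← pv_lower_length h, hg2]
      have hql : ("contains".toList : List Char).length = 8 := by decide
      rw [pv_slice_drop h v (("contains".toList.length : Int) + 1) (by rw [hlen, hql]; try decide)]
      rw [pv_valid_eq, hg2]
      rw [show PySem.Set.contains pvPrefixSet
            (if PySem.Chars.endswith "contains".toList ['/', 'i']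
             then PySem.Chars.slice "contains".toList none (some (-2)) else "contains".toList) = true from by decide,
          Bool.true_and]
    · rw [if_neg hg2]
      by_cases hg3 : PySem.Chars.lower h = ("regex".toList ++ ['/', 'i'])
      · rw [if_pos hg3]
        have hlen : h.length = (("regex".toList ++ ['/', 'i']) : List Char).length := by rw [← pv_lower_length h, hg3]
        have hql : (("regex".toList ++ ['/', 'i']) : List Char).length = 7 := by decide
        rw [pv_slice_drop h v (("regex".toList.length : Int) + 3) (by rw [hlen, hql]; try decide)]
        rw [pv_valid_eq, hg3]
        rw [show PySem.Set.contains pvPrefixSet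
              (if PySem.Chars.endswith ("regex".toList ++ ['/', 'i']) ['/', 'i']
               then PySem.Chars.slice ("regex".toList ++ ['/', 'i']) none (some (-2)) else ("regex".toList ++ ['/', 'i'])) = true from by decide,
            Bool.true_and]
      · rw [if_neg hg3]
        by_cases hg4 : PySem.Chars.lower h = "regex".toList
        · rw [if_pos hg4]
          have hlen : h.length = ("regex".toList : List Char).length := by rw [← pv_lower_length h, hg4]
          have hql : ("regex".toList : List Char).length = 5 := by decide
          rw [pv_slice_drop h v (("regex".toList.length : Int) + 1) (by rw [hlen, hql]; try decide)]
          rw [pv_valid_eq, hg4]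
          rw [show PySem.Set.contains pvPrefixSet
                (if PySem.Chars.endswith "regex".toList ['/', 'i']
                 then PySem.Chars.slice "regex".toList none (some (-2)) else "regex".toList) = true from by decide,
              Bool.true_and]
        · rw [if_neg hg4]
          by_cases hg5 : PySem.Chars.lower h = ("line-starts".toList ++ ['/', 'i'])
          · rw [if_pos hg5]
            have hlen : h.length = (("line-starts".toList ++ ['/', 'i']) : List Char).length := by rw [← pv_lower_length h, hg5]
            have hql : (("line-starts".toList ++ ['/', 'i']) : List Char).length = 13 := by decide
            rw [pv_slice_drop h v (("line-starts".toList.length : Int) + 3) (by rw [hlen, hql]; try decide)]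
            rw [pv_valid_eq, hg5]
            rw [show PySem.Set.contains pvPrefixSet
                  (if PySem.Chars.endswith ("line-starts".toList ++ ['/', 'i']) ['/', 'i']
                   then PySem.Chars.slice ("line-starts".toList ++ ['/', 'i']) none (some (-2)) else ("line-starts".toList ++ ['/', 'i'])) = true from by decide,
                Bool.true_and]
          · rw [if_neg hg5]
            by_cases hg6 : PySem.Chars.lower h = "line-starts".toList
            · rw [if_pos hg6]
              have hlen : h.length = ("line-starts".toList : List Char).length := by rw [← pv_lower_length h, hg6]
              have hql : ("line-starts".toList : List Char).length = 11 := by decide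
              rw [pv_slice_drop h v (("line-starts".toList.length : Int) + 1) (by rw [hlen, hql]; try decide)]
              rw [pv_valid_eq, hg6]
              rw [show PySem.Set.contains pvPrefixSet
                    (if PySem.Chars.endswith "line-starts".toList ['/', 'i']
                     then PySem.Chars.slice "line-starts".toList none (some (-2)) else "line-starts".toList) = true from by decide,
                  Bool.true_and]
            · rw [if_neg hg6]
              by_cases hg7 : PySem.Chars.lower h = ("type".toList ++ ['/', 'i'])
              · rw [if_pos hg7]
                have hlen : h.length = (("type".toList ++ ['/', 'i']) : List Char).length := by rw [← pv_lower_length h, hg7]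
                have hql : (("type".toList ++ ['/', 'i']) : List Char).length = 6 := by decide
                rw [pv_slice_drop h v (("type".toList.length : Int) + 3) (by rw [hlen, hql]; try decide)]
                rw [pv_valid_eq, hg7]
                rw [show PySem.Set.contains pvPrefixSet
                      (if PySem.Chars.endswith ("type".toList ++ ['/', 'i']) ['/', 'i']
                       then PySem.Chars.slice ("type".toList ++ ['/', 'i']) none (some (-2)) else ("type".toList ++ ['/', 'i'])) = true from by decide,
                    Bool.true_and]
              · rw [if_neg hg7]
                by_cases hg8 : PySem.Chars.lower h = "type".toList
                · rw [if_pos hg8]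
                  have hlen : h.length = ("type".toList : List Char).length := by rw [← pv_lower_length h, hg8]
                  have hql : ("type".toList : List Char).length = 4 := by decide
                  rw [pv_slice_drop h v (("type".toList.length : Int) + 1) (by rw [hlen, hql]; try decide)]
                  rw [pv_valid_eq, hg8]
                  rw [show PySem.Set.contains pvPrefixSet
                        (if PySem.Chars.endswith "type".toList ['/', 'i']
                         then PySem.Chars.slice "type".toList none (some (-2)) else "type".toList) = true from by decide,
                      Bool.true_and]
                · rw [if_neg hg8]
                  by_cases hg9 : PySem.Chars.lower h = ("size".toList ++ ['/', 'i'])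
                  · rw [if_pos hg9]
                    have hlen : h.length = (("size".toList ++ ['/', 'i']) : List Char).length := by rw [← pv_lower_length h, hg9]
                    have hql : (("size".toList ++ ['/', 'i']) : List Char).length = 6 := by decide
                    rw [pv_slice_drop h v (("size".toList.length : Int) + 3) (by rw [hlen, hql]; try decide)]
                    rw [pv_valid_eq, hg9]
                    rw [show PySem.Set.contains pvPrefixSet
                          (if PySem.Chars.endswith ("size".toList ++ ['/', 'i']) ['/', 'i']
                           then PySem.Chars.slice ("size".toList ++ ['/', 'i']) none (some (-2)) else ("size".toList ++ ['/', 'i'])) = true from by decide,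
                        Bool.true_and]
                  · rw [if_neg hg9]
                    by_cases hg10 : PySem.Chars.lower h = "size".toList
                    · rw [if_pos hg10]
                      have hlen : h.length = ("size".toList : List Char).length := by rw [← pv_lower_length h, hg10]
                      have hql : ("size".toList : List Char).length = 4 := by decide
                      rw [pv_slice_drop h v (("size".toList.length : Int) + 1) (by rw [hlen, hql]; try decide)]
                      rw [pv_valid_eq, hg10]
                      rw [show PySem.Set.contains pvPrefixSet
                            (if PySem.Chars.endswith "size".toList ['/', 'i']
                             then PySem.Chars.slice "size".toList none (some (-2)) else "size".toList) = true from by decide,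
                          Bool.true_and]
                    · rw [if_neg hg10]
                      · by_cases hE : PySem.Chars.endswith (PySem.Chars.lower h) ['/', 'i']
                        · obtain ⟨t, ht⟩ := (PySem.Chars.endswith_iff _ _).mp hE
                          have hsl : PySem.Chars.slice (PySem.Chars.lower h) none (some (-2)) = t := by
                            rw [PySem.Chars.slice_eq_listSlice,
                                PySem.List.slice_to_neg_ofNat (PySem.Chars.lower h) 2 (by omega), ← ht]
                            simp
                          rw [if_pos hE, hsl]
                          have hcf : PySem.Set.contains pvPrefixSet t = false := by
                            rw [Bool.eq_false_iff]
                            intro hc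
                            have hmem := (PySem.Set.contains_iff pvPrefixSet t).mp hc
                            rw [pvPrefixSet, PySem.Set.mem_ofList] at hmem
                            simp only [List.mem_cons, List.not_mem_nil, or_false] at hmem
                            rcases hmem with hq5 | hq5 | hq5 | hq5 | hq5
                            · rw [hq5] at ht
                              exact hg1 ht.symm
                            · rw [hq5] at ht
                              exact hg3 ht.symm
                            · rw [hq5] at ht
                              exact hg5 ht.symm
                            · rw [hq5] at ht
                              exact hg7 ht.symm
                            · rw [hq5] at ht
                              exact hg9 ht.symm
                          rw [hcf, Bool.false_and]
                        · rw [if_neg hE]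
                          have hcf : PySem.Set.contains pvPrefixSet (PySem.Chars.lower h) = false := by
                            rw [Bool.eq_false_iff]
                            intro hc
                            have hmem := (PySem.Set.contains_iff pvPrefixSet (PySem.Chars.lower h)).mp hc
                            rw [pvPrefixSet, PySem.Set.mem_ofList] at hmem
                            simp only [List.mem_cons, List.not_mem_nil, or_false] at hmem
                            rcases hmem with hc5 | hc5 | hc5 | hc5 | hc5
                            · exact hg2 hc5
                            · exact hg4 hc5
                            · exact hg6 hc5
                            · exact hg8 hc5
                            · exact hg10 hc5
                          rw [hcf, Bool.false_and]

theorem looks_like_pattern_spec' : ∀ (range_str : String),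
    looks_like_pattern range_str = looks_like_pattern_alt range_str := by
  intro s
  unfold looks_like_pattern looks_like_pattern_alt
  cases hsp : pvSplitColon (PySem.Chars.strip s.toList) with
  | none =>
    have hni := pv_splitColon_none hsp
    have hIn : PySem.Chars.isIn [':'] (PySem.Chars.strip s.toList) = false := by
      rw [PySem.Chars.isIn_eq_false_iff]
      intro hinf
      exact hni (hinf.sublist.subset (List.mem_singleton.mpr rfl))
    simp [hIn]
  | some r =>
    obtain ⟨h, v⟩ := r
    obtain ⟨ht, hnh⟩ := pv_splitColon_some hsp
    have hIn : PySem.Chars.isIn [':'] (PySem.Chars.strip s.toList) = true := by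
      rw [PySem.Chars.isIn_iff_infix, ht]
      exact ⟨h, v, by simp⟩
    simp only [hIn, Bool.not_true, if_neg (by simp : ¬ (false = true))]
    rw [ht]
    exact pv_loop_eq h v hnh

-- ===== VERDICT (by name: the statement is the Claim_ definition above) =====
theorem looks_like_pattern_spec : Claim_equal_looks_like_pattern := by
  intro range_str _hdom
  unfold Spec_looks_like_pattern
  exact looks_like_pattern_spec' range_str
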